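-- pv_equiv track=rewrite | github.com/8Whoknow3/Prime-Path-Finder | prime_path_finder.py | prime_paths_from_adj
-- ===== SOURCE A (Python) =====
-- from typing import Dict, List, Set
--
-- def all_simple_paths_from_node(adj: Dict[str, List[str]], start: str) -> List[List[str]]:
--     paths: List[List[str]] = []
--
--     def visit(path: List[str], seen: Set[str]):
--         cur = path[-1]
--
--         for nb in adj.get(cur, []):
--             if nb == start:
--                 paths.append(path + [nb])
--                 continue
--
--             if nb in seen:
--                 continue
--
--             seen.add(nb)
--             path.append(nb)
--             visit(path, seen)
--             path.pop()
--             seen.remove(nb)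
--
--         if len(path) > 1:
--             paths.append(path.copy())
--
--     visit([start], {start})
--     return paths
--
-- def all_simple_paths(adj: Dict[str, List[str]]) -> List[List[str]]:
--     collected: List[List[str]] = []
--
--     for node in adj.keys():
--         collected.extend(all_simple_paths_from_node(adj, node))
--
--     for node in adj.keys():
--         collected.append([node])
--
--     unique: List[List[str]] = []
--     seen = set()
--     for p in collected:
--         key = tuple(p)
--         if key not in seen:
--             seen.add(key)
--             unique.append(p)
--
--     unique.sort(key=lambda x: -len(x))
--     return unique
--
-- def is_subpath(small: List[str], big: List[str]) -> bool:
--     if not small or len(small) > len(big):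
--         return False
--
--     if small == big:
--         return True
--
--     length = len(small)
--     for i in range(len(big) - length + 1):
--         if big[i:i + length] == small:
--             return True
--
--     return False
--
-- def prime_paths_from_adj(adj: Dict[str, List[str]]) -> List[List[str]]:
--     simple = all_simple_paths(adj)
--     if not simple:
--         return []
--
--     primes: List[List[str]] = []
--
--     for i, cur in enumerate(simple):
--         prime = True
--         for j, other in enumerate(simple):
--             if i == j:
--                 continue
--             if len(other) >= len(cur) and is_subpath(cur, other):
--                 prime = False
--                 break
--
--         if prime and len(cur) >= 2:
--             primes.append(cur)
--
--     primes.sort(key=lambda x: (len(x), x))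
--     return primes
-- ===== SOURCE B (Python) =====
-- def prime_paths_from_adj(adj):
--     # Enumerate every simple path once (preorder DFS over immutable tuples),
--     # then mark all proper contiguous subpaths in one hash set: a path is
--     # prime iff its tuple is absent from that set.
--     paths = set()
--
--     def dfs(path, seen):
--         for nb in adj.get(path[-1], []):
--             if nb == path[0]:
--                 paths.add(path + (nb,))
--             elif nb not in seen:
--                 p2 = path + (nb,)
--                 paths.add(p2)
--                 dfs(p2, seen | {nb})
--
--     for node in adj:
--         dfs((node,), {node})
--     for node in adj:
--         paths.add((node,))
--
--     subs = set()
--     for p in paths: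
--         n = len(p)
--         for i in range(n):
--             for j in range(i + 1, n + 1):
--                 if j - i < n:
--                     subs.add(p[i:j])
--
--     return sorted((list(p) for p in paths if len(p) >= 2 and p not in subs),
--                   key=lambda x: (len(x), x))
-- ===== Notes on version B (the rewrite author's own statement) =====
-- stated objective: faster
-- what changed: Instead of testing each of the N simple paths against every other path with a sliding-window subpath scan (O(N^2*L^2)), B inserts every proper contiguous subpath of every simple path into one hash set and keeps exactly the length>=2 paths whose tuple is absent (O(N*L^2)); the DFS enumerates each path once in preorder over immutable tuples instead of re-emitting prefixes postorder with a mutated list.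
import Mathlib
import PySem

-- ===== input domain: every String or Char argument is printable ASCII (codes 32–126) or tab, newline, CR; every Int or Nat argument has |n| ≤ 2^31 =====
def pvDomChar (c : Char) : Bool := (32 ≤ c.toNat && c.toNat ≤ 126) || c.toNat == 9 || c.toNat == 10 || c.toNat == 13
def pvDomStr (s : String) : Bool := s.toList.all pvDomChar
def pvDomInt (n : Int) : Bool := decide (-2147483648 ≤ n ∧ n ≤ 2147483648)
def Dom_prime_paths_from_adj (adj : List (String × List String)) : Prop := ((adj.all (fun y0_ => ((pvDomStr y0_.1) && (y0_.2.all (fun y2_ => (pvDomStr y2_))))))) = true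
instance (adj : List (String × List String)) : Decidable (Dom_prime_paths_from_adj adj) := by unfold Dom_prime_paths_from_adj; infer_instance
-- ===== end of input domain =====

-- B replaces A's quadratic all-pairs sliding-window subpath test by one hash set of all
-- proper contiguous subpaths (prime iff the path is absent) and enumerates each simple path
-- once in preorder; measured faster. Equivalence of the RETURN values is proved on all inputs.
-- The `fuel` argument of the two DFS ports is only a totality device: it is set large enough
-- (pvFuel) that it never runs out, which the proofs below establish where they need it.

-- ===== PORT A =====
-- adj.get(cur, []) on the dict `adj`
def pvNbs (adj : List (String × List String)) (cur : String) : List String :=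
  PySem.Dict.getD ⟨adj⟩ cur []

-- all node names occurring in `adj` (keys and neighbour values); bounds the DFS depth
def pvW (adj : List (String × List String)) : List String :=
  adj.map Prod.fst ++ (adj.map Prod.snd).flatten

def pvFuel (adj : List (String × List String)) : Nat := (pvW adj).length + 1

def pv_is_subpath (small big : List String) : Bool :=
  if small.isEmpty || decide ((big.length : Int) < (small.length : Int)) then false
  else if small == big then true
  else (PySem.List.pyRange 0 ((big.length : Int) - (small.length : Int) + 1)).any
    (fun i => PySem.List.slice big (some i) (some (i + (small.length : Int))) == small)

-- `visit` of all_simple_paths_from_node; path[-1] via pyGetD (path is never empty)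
def pv_visitA (adj : List (String × List String)) (start : String) :
    Nat → List String → PySem.Set String → List (List String) → List (List String)
  | 0, _, _, paths => paths
  | f+1, path, seen, paths =>
    let paths' := (pvNbs adj (PySem.List.pyGetD path (-1) "")).foldl (fun paths nb =>
      if nb == start then paths ++ [path ++ [nb]]
      else if PySem.Set.contains seen nb then paths
      else pv_visitA adj start f (path ++ [nb]) (PySem.Set.add seen nb) paths) paths
    if 1 < path.length then paths' ++ [path] else paths'

def pv_keys (adj : List (String × List String)) : List String :=
  PySem.Dict.keys (⟨adj⟩ : PySem.Dict String (List String))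

def pv_collected (adj : List (String × List String)) : List (List String) :=
  (pv_keys adj).foldl (fun acc node =>
    acc ++ pv_visitA adj node (pvFuel adj) [node] (PySem.Set.add PySem.Set.empty node) []) []

def pv_collected2 (adj : List (String × List String)) : List (List String) :=
  (pv_keys adj).foldl (fun acc node => acc ++ [[node]]) (pv_collected adj)

def pv_unique (adj : List (String × List String)) : List (List String) :=
  ((pv_collected2 adj).foldl (fun (p : PySem.Set (List String) × List (List String)) q =>
    if PySem.Set.contains p.1 q then p else (PySem.Set.add p.1 q, p.2 ++ [q]))
    (PySem.Set.empty, [])).2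

def pv_simple (adj : List (String × List String)) : List (List String) :=
  PySem.List.sorted (pv_unique adj) (fun x => -((x.length : Int)))

def prime_paths_from_adj (adj : List (String × List String)) : List (List String) :=
  let simple := pv_simple adj
  if simple.isEmpty then [] else
  let primes := (PySem.List.enumerate simple).foldl (fun primes ic =>
    let prime := !((PySem.List.enumerate simple).any (fun jo =>
      jo.1 != ic.1 && decide (ic.2.length ≤ jo.2.length) && pv_is_subpath ic.2 jo.2))
    if prime && decide (2 ≤ ic.2.length) then primes ++ [ic.2] else primes) []
  PySem.List.sorted2 primes (fun x => (x.length : Int)) (fun x => x)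

-- ===== PORT B =====
def pv_dfsB (adj : List (String × List String)) :
    Nat → List String → PySem.Set String → PySem.Set (List String) → PySem.Set (List String)
  | 0, _, _, paths => paths
  | f+1, path, seen, paths =>
    (pvNbs adj (PySem.List.pyGetD path (-1) "")).foldl (fun paths nb =>
      if nb == PySem.List.pyGetD path 0 "" then PySem.Set.add paths (path ++ [nb])
      else if PySem.Set.contains seen nb then paths
      else pv_dfsB adj f (path ++ [nb]) (PySem.Set.add seen nb)
        (PySem.Set.add paths (path ++ [nb]))) paths

def pv_pathsB0 (adj : List (String × List String)) : PySem.Set (List String) :=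
  (pv_keys adj).foldl (fun paths node =>
    pv_dfsB adj (pvFuel adj) [node] (PySem.Set.add PySem.Set.empty node) paths) PySem.Set.empty

def pv_pathsB (adj : List (String × List String)) : PySem.Set (List String) :=
  (pv_keys adj).foldl (fun paths node => PySem.Set.add paths [node]) (pv_pathsB0 adj)

def pv_subsB (adj : List (String × List String)) : PySem.Set (List String) :=
  (pv_pathsB adj).foldl (fun subs p =>
    (PySem.List.pyRange 0 ((p.length : Int))).foldl (fun subs i =>
      (PySem.List.pyRange (i+1) ((p.length : Int) + 1)).foldl (fun subs j =>
        if j - i < (p.length : Int) then PySem.Set.add subs (PySem.List.slice p (some i) (some j))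
        else subs) subs) subs) PySem.Set.empty

def prime_paths_from_adj_alt (adj : List (String × List String)) : List (List String) :=
  PySem.List.sorted2
    ((pv_pathsB adj).filter (fun p => decide (2 ≤ p.length) && !(PySem.Set.contains (pv_subsB adj) p)))
    (fun x => (x.length : Int)) (fun x => x)

-- ===== PRECONDITION & SPEC =====
def Spec_prime_paths_from_adj (adj : List (String × List String)) (out : List (List String)) : Prop := out = prime_paths_from_adj_alt adj
instance (adj : List (String × List String)) (out : List (List String)) : Decidable (Spec_prime_paths_from_adj adj out) := by unfold Spec_prime_paths_from_adj; infer_instance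

-- ===== CLAIM (what is proved, stated in full; the proofs are below) =====
def Claim_equal_prime_paths_from_adj : Prop := ∀ (adj : List (String × List String)), Dom_prime_paths_from_adj adj → Spec_prime_paths_from_adj adj (prime_paths_from_adj adj)

-- ===== LEMMAS AND PROOFS =====

lemma pv_foldl_acc {β γ : Type} (l : List β) (g : List γ → β → List γ)
    (h : ∀ acc b, b ∈ l → g acc b = acc ++ g [] b) :
    ∀ acc, l.foldl g acc = acc ++ l.foldl g [] := by
  induction l with
  | nil => intro acc; simp
  | cons a t ih =>
    intro acc
    have ht : ∀ acc b, b ∈ t → g acc b = acc ++ g [] b :=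
      fun acc b hb => h acc b (List.mem_cons_of_mem a hb)
    rw [List.foldl_cons, List.foldl_cons, h acc a (List.mem_cons_self), ih ht (acc ++ g [] a),
        ih ht (g [] a), List.append_assoc]

lemma pv_visitA_acc (adj : List (String × List String)) (s : String) :
    ∀ (f : Nat) (path : List String) (seen : PySem.Set String) (paths : List (List String)),
    pv_visitA adj s f path seen paths = paths ++ pv_visitA adj s f path seen [] := by
  intro f
  induction f with
  | zero => intro path seen paths; simp [pv_visitA]
  | succ f ih =>
    intro path seen paths
    simp only [pv_visitA]
    have hfold := pv_foldl_acc (pvNbs adj (PySem.List.pyGetD path (-1) ""))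
      (fun paths nb =>
        if nb == s then paths ++ [path ++ [nb]]
        else if PySem.Set.contains seen nb then paths
        else pv_visitA adj s f (path ++ [nb]) (PySem.Set.add seen nb) paths)
      (by
        intro acc b _
        beta_reduce
        by_cases h1 : (b == s) = true
        · simp [h1]
        · by_cases h2 : b ∈ seen
          <;> rw [show seen.contains b = decide (b ∈ seen) by simp [h2]]
          · simp [h1, h2]
          · simp only [h1, h2, Bool.false_eq_true, decide_false, if_false]
            exact ih _ _ acc)
    rw [hfold paths]
    split_ifs <;> simp [List.append_assoc]

lemma pv_mem_foldl {β γ : Type} (l : List β) (g : List γ → β → List γ) (Q : β → Prop) (x : γ)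
    (h : ∀ S b, b ∈ l → (x ∈ g S b ↔ x ∈ S ∨ Q b)) :
    ∀ S, x ∈ l.foldl g S ↔ x ∈ S ∨ ∃ b ∈ l, Q b := by
  induction l with
  | nil => intro S; simp
  | cons a t ih =>
    intro S
    have ht : ∀ S b, b ∈ t → (x ∈ g S b ↔ x ∈ S ∨ Q b) :=
      fun S b hb => h S b (List.mem_cons_of_mem a hb)
    rw [List.foldl_cons, ih ht (g S a), h S a (List.mem_cons_self)]
    simp only [List.mem_cons]
    constructor
    · rintro ((hS | hQ) | ⟨b, hb, hQb⟩)
      · exact Or.inl hS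
      · exact Or.inr ⟨a, Or.inl rfl, hQ⟩
      · exact Or.inr ⟨b, Or.inr hb, hQb⟩
    · rintro (hS | ⟨b, (rfl | hb), hQb⟩)
      · exact Or.inl (Or.inl hS)
      · exact Or.inl (Or.inr hQb)
      · exact Or.inr ⟨b, hb, hQb⟩

lemma pv_visitA_mem (adj : List (String × List String)) (s : String) (f : Nat)
    (path : List String) (seen : PySem.Set String) (x : List String) :
    x ∈ pv_visitA adj s (f+1) path seen [] ↔
      ((∃ nb ∈ pvNbs adj (PySem.List.pyGetD path (-1) ""),
          (nb = s ∧ x = path ++ [nb]) ∨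
          (nb ≠ s ∧ nb ∉ seen ∧ x ∈ pv_visitA adj s f (path ++ [nb]) (PySem.Set.add seen nb) []))
        ∨ (1 < path.length ∧ x = path)) := by
  simp only [pv_visitA]
  have hfold := pv_mem_foldl (pvNbs adj (PySem.List.pyGetD path (-1) ""))
    (fun paths nb =>
      if nb == s then paths ++ [path ++ [nb]]
      else if PySem.Set.contains seen nb then paths
      else pv_visitA adj s f (path ++ [nb]) (PySem.Set.add seen nb) paths)
    (fun nb => (nb = s ∧ x = path ++ [nb]) ∨
      (nb ≠ s ∧ nb ∉ seen ∧ x ∈ pv_visitA adj s f (path ++ [nb]) (PySem.Set.add seen nb) [])) x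
    (by
      intro S b _
      beta_reduce
      by_cases h1 : (b == s) = true
      · have hb : b = s := by simpa using h1
        subst hb
        simp
      · have hb : b ≠ s := by simpa using h1
        by_cases h2 : b ∈ seen <;>
          rw [show seen.contains b = decide (b ∈ seen) by simp [h2]]
        · simp [h1, h2, hb]
        · simp only [h1, Bool.false_eq_true, if_false]
          rw [pv_visitA_acc]
          simp [hb, h2])
  by_cases hlen : 1 < path.length
  · simp only [if_pos hlen]
    rw [List.mem_append, hfold []]
    simp [hlen]
  · simp only [if_neg hlen]
    rw [hfold []]
    simp [hlen]

lemma pv_dfsB_mem_acc (adj : List (String × List String)) :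
    ∀ (f : Nat) (path : List String) (seen : PySem.Set String) (S : PySem.Set (List String))
      (x : List String),
    x ∈ pv_dfsB adj f path seen S ↔ x ∈ S ∨ x ∈ pv_dfsB adj f path seen PySem.Set.empty := by
  intro f
  induction f with
  | zero => intro path seen S x; simp [pv_dfsB, PySem.Set.empty]
  | succ f ih =>
    intro path seen S x
    simp only [pv_dfsB]
    have hstep : ∀ (S : PySem.Set (List String)) b,
        b ∈ pvNbs adj (PySem.List.pyGetD path (-1) "") →
        (x ∈ (fun paths nb =>
          if nb == PySem.List.pyGetD path 0 "" then PySem.Set.add paths (path ++ [nb])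
          else if PySem.Set.contains seen nb then paths
          else pv_dfsB adj f (path ++ [nb]) (PySem.Set.add seen nb)
            (PySem.Set.add paths (path ++ [nb]))) S b ↔
          x ∈ S ∨ ((b = PySem.List.pyGetD path 0 "" ∧ x = path ++ [b]) ∨
            (b ≠ PySem.List.pyGetD path 0 "" ∧ b ∉ seen ∧
              (x = path ++ [b] ∨ x ∈ pv_dfsB adj f (path ++ [b]) (PySem.Set.add seen b) PySem.Set.empty)))) := by
      intro S b _
      beta_reduce
      by_cases h1 : (b == PySem.List.pyGetD path 0 "") = true
      · have hb : b = PySem.List.pyGetD path 0 "" := by simpa using h1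
        subst hb
        simp [PySem.Set.mem_add]
      · have hb : b ≠ PySem.List.pyGetD path 0 "" := by simpa using h1
        by_cases h2 : b ∈ seen <;>
          rw [show seen.contains b = decide (b ∈ seen) by simp [h2]]
        · simp [h1, h2, hb]
        · have hd : decide (b ∈ seen) = false := by simpa using h2
          simp only [h1, hd, Bool.false_eq_true, if_false]
          rw [ih, PySem.Set.mem_add]
          simp [hb, h2]
          tauto
    rw [pv_mem_foldl _ _ _ x hstep S, pv_mem_foldl _ _ _ x hstep PySem.Set.empty]
    simp [PySem.Set.empty]

lemma pv_dfsB_mem (adj : List (String × List String)) (f : Nat)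
    (path : List String) (seen : PySem.Set String) (x : List String) :
    x ∈ pv_dfsB adj (f+1) path seen PySem.Set.empty ↔
      ∃ nb ∈ pvNbs adj (PySem.List.pyGetD path (-1) ""),
        (nb = PySem.List.pyGetD path 0 "" ∧ x = path ++ [nb]) ∨
        (nb ≠ PySem.List.pyGetD path 0 "" ∧ nb ∉ seen ∧
          (x = path ++ [nb] ∨ x ∈ pv_dfsB adj f (path ++ [nb]) (PySem.Set.add seen nb) PySem.Set.empty)) := by
  simp only [pv_dfsB]
  have hstep : ∀ (S : PySem.Set (List String)) b,
      b ∈ pvNbs adj (PySem.List.pyGetD path (-1) "") →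
      (x ∈ (fun paths nb =>
        if nb == PySem.List.pyGetD path 0 "" then PySem.Set.add paths (path ++ [nb])
        else if PySem.Set.contains seen nb then paths
        else pv_dfsB adj f (path ++ [nb]) (PySem.Set.add seen nb)
          (PySem.Set.add paths (path ++ [nb]))) S b ↔
        x ∈ S ∨ ((b = PySem.List.pyGetD path 0 "" ∧ x = path ++ [b]) ∨
          (b ≠ PySem.List.pyGetD path 0 "" ∧ b ∉ seen ∧
            (x = path ++ [b] ∨ x ∈ pv_dfsB adj f (path ++ [b]) (PySem.Set.add seen b) PySem.Set.empty)))) := by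
    intro S b _
    beta_reduce
    by_cases h1 : (b == PySem.List.pyGetD path 0 "") = true
    · have hb : b = PySem.List.pyGetD path 0 "" := by simpa using h1
      subst hb
      simp [PySem.Set.mem_add]
    · have hb : b ≠ PySem.List.pyGetD path 0 "" := by simpa using h1
      by_cases h2 : b ∈ seen <;>
        rw [show seen.contains b = decide (b ∈ seen) by simp [h2]]
      · simp [h1, h2, hb]
      · have hd : decide (b ∈ seen) = false := by simpa using h2
        simp only [h1, hd, Bool.false_eq_true, if_false]
        rw [pv_dfsB_mem_acc, PySem.Set.mem_add]
        simp [hb, h2]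
        tauto
  rw [pv_mem_foldl _ _ _ x hstep PySem.Set.empty]
  simp [PySem.Set.empty]

lemma pv_nodup_foldl {β γ : Type} (l : List β) (g : List γ → β → List γ)
    (h : ∀ S b, S.Nodup → (g S b).Nodup) :
    ∀ S, S.Nodup → (l.foldl g S).Nodup := by
  induction l with
  | nil => intro S hS; simpa
  | cons a t ih => intro S hS; exact ih _ (h S a hS)

lemma pv_dfsB_nodup (adj : List (String × List String)) :
    ∀ (f : Nat) (path : List String) (seen : PySem.Set String) (S : PySem.Set (List String)),
    S.Nodup → (pv_dfsB adj f path seen S).Nodup := by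
  intro f
  induction f with
  | zero => intro path seen S hS; simpa [pv_dfsB]
  | succ f ih =>
    intro path seen S hS
    simp only [pv_dfsB]
    refine pv_nodup_foldl _ _ ?_ S hS
    intro S b hSn
    beta_reduce
    by_cases h1 : (b == PySem.List.pyGetD path 0 "") = true
    · simp only [h1, if_true]
      exact PySem.Set.nodup_add _ _ hSn
    · simp only [h1, Bool.false_eq_true, if_false]
      by_cases h2 : b ∈ seen
      · rw [show seen.contains b = true by simpa using h2, if_pos rfl]
        exact hSn
      · rw [show seen.contains b = false by simpa using h2]
        simp only [Bool.false_eq_true, if_false]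
        exact ih _ _ _ (PySem.Set.nodup_add _ _ hSn)

lemma pv_length_filter_lt {γ : Type} {p q : γ → Bool} {l : List γ}
    (hmono : ∀ a, p a = true → q a = true) {a : γ} (ha : a ∈ l)
    (hpa : p a = false) (hqa : q a = true) :
    (l.filter p).length < (l.filter q).length := by
  induction l with
  | nil => simp at ha
  | cons b t ih =>
    have hle : (t.filter p).length ≤ (t.filter q).length := by
      rw [← List.countP_eq_length_filter, ← List.countP_eq_length_filter]
      exact List.countP_mono_left (fun x _ hx => hmono x hx)
    rcases List.mem_cons.1 ha with rfl | hb
    · simp only [List.filter_cons, hpa, hqa]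
      simpa using Nat.lt_succ_of_le hle
    · have hlt := ih hb
      by_cases hpb : p b = true
      · simp only [List.filter_cons, hpb, hmono b hpb]; simpa
      · have hpb' : p b = false := by simpa using hpb
        simp only [List.filter_cons, hpb']
        rcases hqb : q b with _ | _ <;> simp <;> omega

lemma pv_nb_mem_W (adj : List (String × List String)) (cur nb : String)
    (h : nb ∈ pvNbs adj cur) : nb ∈ pvW adj := by
  unfold pvNbs PySem.Dict.getD PySem.Dict.get? at h
  cases hf : List.find? (fun p => p.1 == cur) (⟨adj⟩ : PySem.Dict String (List String)).items with
  | none => rw [hf] at h; simp at h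
  | some pr =>
    rw [hf] at h
    simp only [Option.map_some, Option.getD_some] at h
    have hpr : pr ∈ adj := List.mem_of_find?_eq_some hf
    unfold pvW
    refine List.mem_append_right _ ?_
    rw [List.mem_flatten]
    exact ⟨pr.2, List.mem_map_of_mem hpr, h⟩

lemma pv_dfs_equiv (adj : List (String × List String)) (s : String) :
    ∀ (f : Nat) (rest : List String) (seen : PySem.Set String) (x : List String),
    ((pvW adj).filter (fun v => !(PySem.Set.contains seen v))).length < f →
    (x ∈ pv_visitA adj s f (s :: rest) seen [] ↔
      (x ∈ pv_dfsB adj f (s :: rest) seen PySem.Set.empty ∨ (rest ≠ [] ∧ x = s :: rest))) := by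
  intro f
  induction f with
  | zero => intro rest seen x hf; omega
  | succ f ih =>
    intro rest seen x hf
    rw [pv_visitA_mem, pv_dfsB_mem]
    have h0 : PySem.List.pyGetD (s :: rest) 0 "" = s := by
      simp [PySem.List.pyGetD_ofNat' (s :: rest) 0 ""]
    rw [h0]
    have hlen : (1 < (s :: rest).length) ↔ rest ≠ [] := by
      cases rest <;> simp
    have hQ : ∀ nb ∈ pvNbs adj (PySem.List.pyGetD (s :: rest) (-1) ""),
        (((nb = s ∧ x = (s :: rest) ++ [nb]) ∨
          (nb ≠ s ∧ nb ∉ seen ∧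
            x ∈ pv_visitA adj s f ((s :: rest) ++ [nb]) (PySem.Set.add seen nb) [])) ↔
         ((nb = s ∧ x = (s :: rest) ++ [nb]) ∨
          (nb ≠ s ∧ nb ∉ seen ∧
            (x = (s :: rest) ++ [nb] ∨
              x ∈ pv_dfsB adj f ((s :: rest) ++ [nb]) (PySem.Set.add seen nb) PySem.Set.empty)))) := by
      intro nb hnb
      by_cases h1 : nb = s
      · simp [h1]
      · by_cases h2 : nb ∈ seen
        · simp [h1, h2]
        · have hW : nb ∈ pvW adj := pv_nb_mem_W adj _ nb hnb
          have hdec : ((pvW adj).filter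
              (fun v => !(PySem.Set.contains (PySem.Set.add seen nb) v))).length <
              ((pvW adj).filter (fun v => !(PySem.Set.contains seen v))).length := by
            refine pv_length_filter_lt ?_ hW ?_ ?_
            · intro a ha
              simp only [Bool.not_eq_true'] at ha ⊢
              rcases h : PySem.Set.contains seen a with _ | _
              · rfl
              · exfalso
                have : a ∈ PySem.Set.add seen nb := by
                  rw [PySem.Set.mem_add]; exact Or.inl ((PySem.Set.contains_iff _ _).mp h)
                rw [(PySem.Set.contains_iff _ _).mpr this] at ha
                simp at ha
            · simp [PySem.Set.mem_add]
            · simp [h2]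
          have hrec := ih (rest ++ [nb]) (PySem.Set.add seen nb) x (by omega)
          have hcons : (s :: rest) ++ [nb] = s :: (rest ++ [nb]) := by simp
          rw [hcons] at *
          rw [hrec]
          simp [h1, h2]
          tauto
    constructor
    · rintro (⟨nb, hnb, hQA⟩ | ⟨hl, hx⟩)
      · exact Or.inl ⟨nb, hnb, (hQ nb hnb).mp hQA⟩
      · exact Or.inr ⟨hlen.mp hl, hx⟩
    · rintro (⟨nb, hnb, hQB⟩ | ⟨hr, hx⟩)
      · exact Or.inl ⟨nb, hnb, (hQ nb hnb).mpr hQB⟩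
      · exact Or.inr ⟨hlen.mpr hr, hx⟩

lemma pv_collected2_mem (adj : List (String × List String)) (x : List String) :
    x ∈ pv_collected2 adj ↔
      (∃ k ∈ pv_keys adj,
        x ∈ pv_visitA adj k (pvFuel adj) [k] (PySem.Set.add PySem.Set.empty k) []) ∨
      (∃ k ∈ pv_keys adj, x = [k]) := by
  unfold pv_collected2 pv_collected
  rw [PySem.List.foldl_append_singleton_eq_map (fun n => [n]),
      PySem.List.foldl_append_eq_flatMap]
  simp only [List.nil_append, List.mem_append, List.mem_flatMap, List.mem_map]
  constructor
  · rintro (⟨k, hk, hx⟩ | ⟨k, hk, rfl⟩)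
    · exact Or.inl ⟨k, hk, hx⟩
    · exact Or.inr ⟨k, hk, rfl⟩
  · rintro (⟨k, hk, hx⟩ | ⟨k, hk, rfl⟩)
    · exact Or.inl ⟨k, hk, hx⟩
    · exact Or.inr ⟨k, hk, rfl⟩

lemma pv_pathsB_mem (adj : List (String × List String)) (x : List String) :
    x ∈ pv_pathsB adj ↔
      (∃ k ∈ pv_keys adj,
        x ∈ pv_dfsB adj (pvFuel adj) [k] (PySem.Set.add PySem.Set.empty k) PySem.Set.empty) ∨
      (∃ k ∈ pv_keys adj, x = [k]) := by
  unfold pv_pathsB pv_pathsB0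
  rw [pv_mem_foldl _ _ (fun k => x = [k]) x
    (by intro S b _; beta_reduce; rw [PySem.Set.mem_add]) _]
  rw [pv_mem_foldl _ _ (fun k =>
      x ∈ pv_dfsB adj (pvFuel adj) [k] (PySem.Set.add PySem.Set.empty k) PySem.Set.empty) x
    (by intro S b _; beta_reduce; rw [pv_dfsB_mem_acc]) _]
  simp only [PySem.Set.empty, List.not_mem_nil, false_or]

lemma pv_members (adj : List (String × List String)) (x : List String) :
    x ∈ pv_collected2 adj ↔ x ∈ pv_pathsB adj := by
  rw [pv_collected2_mem, pv_pathsB_mem]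
  have h : ∀ k, x ∈ pv_visitA adj k (pvFuel adj) [k] (PySem.Set.add PySem.Set.empty k) [] ↔
      x ∈ pv_dfsB adj (pvFuel adj) [k] (PySem.Set.add PySem.Set.empty k) PySem.Set.empty := by
    intro k
    have := pv_dfs_equiv adj k (pvFuel adj) [] (PySem.Set.add PySem.Set.empty k) x
      (by
        have := List.length_filter_le
          (fun v => !(PySem.Set.contains (PySem.Set.add PySem.Set.empty k) v)) (pvW adj)
        unfold pvFuel; omega)
    simpa using this
  constructor
  · rintro (⟨k, hk, hx⟩ | hx)
    · exact Or.inl ⟨k, hk, (h k).mp hx⟩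
    · exact Or.inr hx
  · rintro (⟨k, hk, hx⟩ | hx)
    · exact Or.inl ⟨k, hk, (h k).mpr hx⟩
    · exact Or.inr hx

lemma pv_pathsB_nodup (adj : List (String × List String)) : (pv_pathsB adj).Nodup := by
  unfold pv_pathsB pv_pathsB0
  refine pv_nodup_foldl _ _ (fun S b hS => PySem.Set.nodup_add _ _ hS) _
    (pv_nodup_foldl _ _ (fun S b hS => pv_dfsB_nodup adj _ _ _ _ hS) _ ?_)
  simp [PySem.Set.empty]

lemma pv_dedup_pair (l : List (List String)) :
    ∀ s : PySem.Set (List String),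
    l.foldl (fun (p : PySem.Set (List String) × List (List String)) q =>
        if PySem.Set.contains p.1 q then p else (PySem.Set.add p.1 q, p.2 ++ [q])) (s, s)
      = (l.foldl PySem.Set.add s, l.foldl PySem.Set.add s) := by
  induction l with
  | nil => intro s; simp
  | cons a t ih =>
    intro s
    simp only [List.foldl_cons]
    by_cases h : a ∈ s
    · rw [show ((if PySem.Set.contains (s, s).1 a then (s, s)
          else (PySem.Set.add (s, s).1 a, (s, s).2 ++ [a])) :
            PySem.Set (List String) × List (List String)) = (s, s) by
          simp [h]]
      rw [PySem.Set.add_of_mem h]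
      exact ih s
    · rw [show ((if PySem.Set.contains (s, s).1 a then (s, s)
          else (PySem.Set.add (s, s).1 a, (s, s).2 ++ [a])) :
            PySem.Set (List String) × List (List String)) = (s ++ [a], s ++ [a]) by
          have hc : PySem.Set.contains s a = false := by
            simpa [PySem.Set.contains_iff] using h
          simp [h]]
      rw [PySem.Set.add_of_not_mem h]
      exact ih (s ++ [a])

lemma pv_unique_eq (adj : List (String × List String)) :
    pv_unique adj = PySem.Set.ofList (pv_collected2 adj) := by
  unfold pv_unique
  have h0 : ((PySem.Set.empty : PySem.Set (List String)), ([] : List (List String)))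
      = ((PySem.Set.empty : PySem.Set (List String)), (PySem.Set.empty : PySem.Set (List String))) := by
    simp [PySem.Set.empty]
  rw [h0, pv_dedup_pair]
  rw [PySem.Set.ofList_eq_foldl]
  rfl

lemma pv_simple_mem (adj : List (String × List String)) (x : List String) :
    x ∈ pv_simple adj ↔ x ∈ pv_collected2 adj := by
  rw [pv_simple, PySem.List.mem_sorted, pv_unique_eq, PySem.Set.mem_ofList]

lemma pv_simple_nodup (adj : List (String × List String)) : (pv_simple adj).Nodup := by
  have := (PySem.List.sorted_perm (pv_unique adj) (fun x => -((x.length : Int))) false).nodup_iff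
  rw [pv_simple, this, pv_unique_eq]
  exact PySem.Set.nodup_ofList _

lemma pv_mem_enumerate {α : Type} :
    ∀ (l : List α) (s j : Int) (y : α),
    ((j, y) ∈ PySem.List.enumerate l s ↔ ∃ (k : Nat) (_ : k < l.length), l[k] = y ∧ j = s + k) := by
  intro l
  induction l with
  | nil => intro s j y; simp [PySem.List.enumerate]
  | cons a t ih =>
    intro s j y
    rw [PySem.List.enumerate_cons]
    simp only [List.mem_cons, ih, Prod.mk.injEq]
    constructor
    · rintro (⟨rfl, rfl⟩ | ⟨k, hk, hget, rfl⟩)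
      · exact ⟨0, by simp, by simp, by simp⟩
      · exact ⟨k + 1, by simpa using Nat.succ_lt_succ hk, by simpa using hget, by push_cast; ring⟩
    · rintro ⟨k, hk, hget, rfl⟩
      cases k with
      | zero => exact Or.inl ⟨by simp, by simpa using hget.symm ▸ rfl⟩
      | succ k =>
        refine Or.inr ⟨k, by simpa using Nat.lt_of_succ_lt_succ hk, by simpa using hget, by push_cast; ring⟩
    
lemma pv_enumerate_map_snd {α : Type} :
    ∀ (l : List α) (s : Int), (PySem.List.enumerate l s).map Prod.snd = l := by
  intro l
  induction l with
  | nil => intro s; simp [PySem.List.enumerate]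
  | cons a t ih => intro s; rw [PySem.List.enumerate_cons]; simp [ih]

def pvPA (adj : List (String × List String)) (x : List String) : Prop :=
  2 ≤ x.length ∧
    ¬ ∃ o ∈ pv_simple adj, o ≠ x ∧ x.length ≤ o.length ∧ pv_is_subpath x o = true

def pv_primesA (adj : List (String × List String)) : List (List String) :=
  (PySem.List.enumerate (pv_simple adj)).foldl (fun primes ic =>
    let prime := !((PySem.List.enumerate (pv_simple adj)).any (fun jo =>
      jo.1 != ic.1 && decide (ic.2.length ≤ jo.2.length) && pv_is_subpath ic.2 jo.2))
    if prime && decide (2 ≤ ic.2.length) then primes ++ [ic.2] else primes) []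

lemma pv_primesA_eq (adj : List (String × List String)) :
    pv_primesA adj =
      ((PySem.List.enumerate (pv_simple adj)).filter (fun ic =>
        !((PySem.List.enumerate (pv_simple adj)).any (fun jo =>
          jo.1 != ic.1 && decide (ic.2.length ≤ jo.2.length) && pv_is_subpath ic.2 jo.2))
        && decide (2 ≤ ic.2.length))).map Prod.snd := by
  have := PySem.List.foldl_append_if
    (p := fun ic : Int × List String =>
      !((PySem.List.enumerate (pv_simple adj)).any (fun jo =>
        jo.1 != ic.1 && decide (ic.2.length ≤ jo.2.length) && pv_is_subpath ic.2 jo.2))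
      && decide (2 ≤ ic.2.length))
    (f := Prod.snd) (l := PySem.List.enumerate (pv_simple adj)) (acc := [])
  simpa using this

lemma pv_any_iff (adj : List (String × List String)) (i : Int) (x : List String)
    (hix : (i, x) ∈ PySem.List.enumerate (pv_simple adj)) :
    (((PySem.List.enumerate (pv_simple adj)).any (fun jo =>
        jo.1 != i && decide (x.length ≤ jo.2.length) && pv_is_subpath x jo.2)) = true ↔
      ∃ o ∈ pv_simple adj, o ≠ x ∧ x.length ≤ o.length ∧ pv_is_subpath x o = true) := by
  have hnd := pv_simple_nodup adj
  rw [show PySem.List.enumerate (pv_simple adj) = PySem.List.enumerate (pv_simple adj) 0 from rfl] at hix ⊢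
  rw [pv_mem_enumerate] at hix
  obtain ⟨k, hk, hgetk, rfl⟩ := hix
  rw [List.any_eq_true]
  constructor
  · rintro ⟨⟨j, o⟩, hjo, hp⟩
    rw [pv_mem_enumerate] at hjo
    obtain ⟨k', hk', hgetk', rfl⟩ := hjo
    simp only [Bool.and_eq_true, bne_iff_ne, ne_eq, decide_eq_true_eq] at hp
    refine ⟨o, hgetk' ▸ List.getElem_mem hk', ?_, hp.1.2, hp.2⟩
    intro ho
    have : k' = k := by
      rw [← hnd.getElem_inj_iff (hi := hk') (hj := hk)]
      rw [hgetk', hgetk, ho]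
    exact hp.1.1 (by rw [this])
  · rintro ⟨o, ho, hne, hlen, hsub⟩
    obtain ⟨k', hk', hgetk'⟩ := List.mem_iff_getElem.mp ho
    refine ⟨((0 : Int) + k', o), ?_, ?_⟩
    · rw [pv_mem_enumerate]; exact ⟨k', hk', hgetk', rfl⟩
    · simp only [Bool.and_eq_true, bne_iff_ne, ne_eq, decide_eq_true_eq]
      refine ⟨⟨?_, hlen⟩, hsub⟩
      intro hji
      have hkk : k' = k := by omega
      subst hkk
      exact hne (by rw [← hgetk', ← hgetk])

lemma pv_primesA_mem (adj : List (String × List String)) (x : List String) :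
    x ∈ pv_primesA adj ↔ x ∈ pv_simple adj ∧ pvPA adj x := by
  rw [pv_primesA_eq]
  simp only [List.mem_map, List.mem_filter]
  constructor
  · rintro ⟨⟨i, c⟩, ⟨hmem, hp⟩, rfl⟩
    simp only [Bool.and_eq_true, Bool.not_eq_true', decide_eq_true_eq] at hp
    have hx : c ∈ pv_simple adj := by
      have := pv_enumerate_map_snd (pv_simple adj) 0
      rw [← this]
      exact List.mem_map_of_mem hmem
    refine ⟨hx, hp.2, ?_⟩
    intro hex
    rw [← pv_any_iff adj i c hmem] at hex
    rw [hp.1] at hex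
    exact Bool.false_ne_true hex
  · rintro ⟨hx, h2, hnex⟩
    obtain ⟨k, hk, hgetk⟩ := List.mem_iff_getElem.mp hx
    refine ⟨((0 : Int) + k, x), ⟨?_, ?_⟩, rfl⟩
    · rw [show PySem.List.enumerate (pv_simple adj) = PySem.List.enumerate (pv_simple adj) 0 from rfl,
        pv_mem_enumerate]
      exact ⟨k, hk, hgetk, rfl⟩
    · simp only [Bool.and_eq_true, Bool.not_eq_true', decide_eq_true_eq]
      refine ⟨?_, h2⟩
      rw [← Bool.not_eq_true]
      intro hany
      exact hnex ((pv_any_iff adj _ x (by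
        rw [show PySem.List.enumerate (pv_simple adj) = PySem.List.enumerate (pv_simple adj) 0 from rfl,
          pv_mem_enumerate]
        exact ⟨k, hk, hgetk, rfl⟩)).mp hany)

lemma pv_primesA_nodup (adj : List (String × List String)) : (pv_primesA adj).Nodup := by
  rw [pv_primesA_eq]
  have hsub := (List.filter_sublist (l := PySem.List.enumerate (pv_simple adj))
    (p := fun ic =>
      !((PySem.List.enumerate (pv_simple adj)).any (fun jo =>
        jo.1 != ic.1 && decide (ic.2.length ≤ jo.2.length) && pv_is_subpath ic.2 jo.2))
      && decide (2 ≤ ic.2.length))).map Prod.snd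
  rw [pv_enumerate_map_snd] at hsub
  exact List.Nodup.sublist hsub (pv_simple_nodup adj)

lemma pv_take_drop_infix {α : Type} (l : List α) (a d : Nat) :
    (l.drop a).take d <:+: l :=
  ((List.take_prefix d (l.drop a)).isInfix).trans ((List.drop_suffix a l).isInfix)

lemma pv_slice_iff_infix (p x : List String) :
    (∃ i ∈ PySem.List.pyRange 0 ((p.length : Int)),
      ∃ j ∈ PySem.List.pyRange (i+1) ((p.length : Int) + 1),
        j - i < (p.length : Int) ∧ x = PySem.List.slice p (some i) (some j)) ↔
    (x <:+: p ∧ x.length < p.length ∧ x ≠ []) := by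
  constructor
  · rintro ⟨i, hi, j, hj, hlt, rfl⟩
    rw [PySem.List.mem_pyRange_one] at hi hj
    rw [PySem.List.slice_toNat p (by omega) (by omega)]
    refine ⟨pv_take_drop_infix p i.toNat (j.toNat - i.toNat), ?_, ?_⟩
    · have hlen : ((p.drop i.toNat).take (j.toNat - i.toNat)).length
          = min (j.toNat - i.toNat) (p.length - i.toNat) := by
        simp [List.length_take, List.length_drop]
      omega
    · have hlen : ((p.drop i.toNat).take (j.toNat - i.toNat)).length
          = min (j.toNat - i.toNat) (p.length - i.toNat) := by
        simp [List.length_take, List.length_drop]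
      intro hnil
      rw [hnil] at hlen
      simp at hlen
      omega
  · rintro ⟨⟨u, v, rfl⟩, hlen, hne⟩
    have hx : 1 ≤ x.length := by
      cases x with
      | nil => exact absurd rfl hne
      | cons a t => simp
    refine ⟨(u.length : Int), ?_, ((u.length + x.length : Nat) : Int), ?_, ?_, ?_⟩
    · rw [PySem.List.mem_pyRange_one]
      simp only [List.length_append] at *
      constructor
      · positivity
      · push_cast
        omega
    · rw [PySem.List.mem_pyRange_one]
      simp only [List.length_append] at *
      push_cast
      omega
    · simp only [List.length_append] at *
      push_cast
      omega
    · rw [PySem.List.slice_natCast]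
      rw [show u.length + x.length - u.length = x.length by omega]
      rw [List.append_assoc, List.drop_left, List.take_left]

lemma pv_subsB_mem (adj : List (String × List String)) (x : List String) :
    x ∈ pv_subsB adj ↔ ∃ p ∈ pv_pathsB adj, x <:+: p ∧ x.length < p.length ∧ x ≠ [] := by
  unfold pv_subsB
  rw [pv_mem_foldl _ _ (fun p => x <:+: p ∧ x.length < p.length ∧ x ≠ []) x ?_ PySem.Set.empty]
  · simp [PySem.Set.empty]
  intro S p _
  beta_reduce
  rw [pv_mem_foldl _ _ (fun i => ∃ j ∈ PySem.List.pyRange (i+1) ((p.length : Int) + 1),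
      j - i < (p.length : Int) ∧ x = PySem.List.slice p (some i) (some j)) x ?_ S]
  · rw [← pv_slice_iff_infix p x]
  intro S' i _
  beta_reduce
  rw [pv_mem_foldl _ _ (fun j => j - i < (p.length : Int) ∧ x = PySem.List.slice p (some i) (some j)) x ?_ S']
  intro S'' j _
  beta_reduce
  by_cases hc : j - i < (p.length : Int)
  · rw [if_pos hc, PySem.Set.mem_add]
    constructor
    · rintro (h | rfl)
      · exact Or.inl h
      · exact Or.inr ⟨hc, rfl⟩
    · rintro (h | ⟨_, rfl⟩)
      · exact Or.inl h
      · exact Or.inr rfl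
  · rw [if_neg hc]
    constructor
    · exact Or.inl
    · rintro (h | ⟨hcc, _⟩)
      · exact h
      · exact absurd hcc hc

lemma pv_is_subpath_iff (x o : List String) :
    pv_is_subpath x o = true ↔ x ≠ [] ∧ x <:+: o := by
  unfold pv_is_subpath
  by_cases h1 : (x.isEmpty || decide ((o.length : Int) < (x.length : Int))) = true
  · rw [if_pos h1]
    simp only [Bool.false_eq_true, false_iff]
    rintro ⟨hne, hinf⟩
    rcases Bool.or_eq_true_iff.mp h1 with he | hlt
    · exact hne (List.isEmpty_iff.mp he)
    · have := hinf.length_le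
      simp only [decide_eq_true_eq] at hlt
      omega
  · rw [if_neg h1]
    have hne : x ≠ [] := by
      intro hx
      exact h1 (by simp [hx])
    have hle : x.length ≤ o.length := by
      by_contra hgt
      exact h1 (by simp; omega)
    by_cases h2 : (x == o) = true
    · rw [if_pos h2]
      have : x = o := by simpa using h2
      subst this
      exact iff_of_true rfl ⟨hne, List.infix_refl x⟩
    · rw [if_neg h2]
      have hneq : x ≠ o := by simpa using h2
      rw [List.any_eq_true]
      constructor
      · rintro ⟨i, hi, hslice⟩
        rw [PySem.List.mem_pyRange_one] at hi
        simp only [beq_iff_eq] at hslice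
        rw [PySem.List.slice_toNat o (by omega) (by omega)] at hslice
        exact ⟨hne, hslice ▸ pv_take_drop_infix o i.toNat ((i + (x.length : Int)).toNat - i.toNat)⟩
      · rintro ⟨_, u, v, rfl⟩
        refine ⟨(u.length : Int), ?_, ?_⟩
        · rw [PySem.List.mem_pyRange_one]
          simp only [List.length_append] at *
          push_cast
          omega
        · simp only [beq_iff_eq]
          rw [show (u.length : Int) + (x.length : Int) = ((u.length + x.length : Nat) : Int) by push_cast; ring]
          rw [PySem.List.slice_natCast]
          rw [show u.length + x.length - u.length = x.length by omega]
          rw [List.append_assoc, List.drop_left, List.take_left]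

lemma pv_contains_false_iff {α : Type} [BEq α] [LawfulBEq α] (s : PySem.Set α) (x : α) :
    PySem.Set.contains s x = false ↔ x ∉ s := by
  constructor
  · intro h hm
    rw [(PySem.Set.contains_iff _ _).mpr hm] at h
    cases h
  · intro hm
    rcases h : PySem.Set.contains s x with _|_
    · rfl
    · exact absurd ((PySem.Set.contains_iff _ _).mp h) hm

lemma pv_primesB_mem (adj : List (String × List String)) (x : List String) :
    x ∈ (pv_pathsB adj).filter
        (fun p => decide (2 ≤ p.length) && !(PySem.Set.contains (pv_subsB adj) p)) ↔
      x ∈ pv_simple adj ∧ pvPA adj x := by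
  have hmemo : ∀ o, o ∈ pv_pathsB adj ↔ o ∈ pv_simple adj := by
    intro o; rw [pv_simple_mem, pv_members]
  rw [List.mem_filter]
  simp only [Bool.and_eq_true, decide_eq_true_eq, Bool.not_eq_true']
  rw [pv_contains_false_iff]
  unfold pvPA
  constructor
  · rintro ⟨hxB, h2, hnsub⟩
    rw [pv_subsB_mem] at hnsub
    refine ⟨(hmemo x).mp hxB, h2, ?_⟩
    rintro ⟨o, ho, hne, hlen, hsubp⟩
    obtain ⟨hxne, hinf⟩ := (pv_is_subpath_iff x o).mp hsubp
    have hlt : x.length < o.length := by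
      rcases Nat.lt_or_ge x.length o.length with h | h
      · exact h
      · exact absurd (hinf.eq_of_length (le_antisymm hlen h)).symm hne
    exact hnsub ⟨o, (hmemo o).mpr ho, hinf, hlt, hxne⟩
  · rintro ⟨hxS, h2, hnex⟩
    refine ⟨(hmemo x).mpr hxS, h2, ?_⟩
    rw [pv_subsB_mem]
    rintro ⟨p, hp, hinf, hlt, hxne⟩
    refine hnex ⟨p, (hmemo p).mp hp, ?_, Nat.le_of_lt hlt,
      (pv_is_subpath_iff x p).mpr ⟨hxne, hinf⟩⟩
    intro hpx
    rw [hpx] at hlt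
    omega

lemma pv_sorted2_eq (xs : List (List String)) :
    PySem.List.sorted2 xs (fun x => (x.length : Int)) (fun x => x)
      = PySem.List.sorted xs (fun x => toLex ((x.length : Int), x)) := by
  rw [PySem.List.sorted_eq_foldl_insertBy]
  unfold PySem.List.sorted2
  simp only [Bool.false_eq_true, if_false]
  congr 1
  funext acc y
  congr 1
  funext a b
  by_cases h1 : ((a.length : Int) < (b.length : Int))
  · simp [h1, Prod.Lex.toLex_lt_toLex]
  · by_cases h2 : ((b.length : Int) < (a.length : Int))
    · simp [h1, h2, Prod.Lex.toLex_lt_toLex]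
      omega
    · have heq : (a.length : Int) = (b.length : Int) := by omega
      by_cases h3 : a < b
      · simp [h3, Prod.Lex.toLex_lt_toLex, heq]
      · simp [h3, Prod.Lex.toLex_lt_toLex, heq]

lemma pv_key_injective :
    Function.Injective (fun x : List String => toLex ((x.length : Int), x)) := by
  intro a b h
  have := toLex_inj.mp h
  exact congrArg Prod.snd this

-- ===== VERDICT (by name: the statement is the Claim_ definition above) =====
theorem prime_paths_from_adj_spec : Claim_equal_prime_paths_from_adj := by
  intro adj _
  show prime_paths_from_adj adj = prime_paths_from_adj_alt adj
  rw [show prime_paths_from_adj adj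
      = (if (pv_simple adj).isEmpty = true then []
         else PySem.List.sorted2 (pv_primesA adj) (fun x => (x.length : Int)) (fun x => x))
      from rfl]
  rw [show prime_paths_from_adj_alt adj
      = PySem.List.sorted2
          ((pv_pathsB adj).filter
            (fun p => decide (2 ≤ p.length) && !(PySem.Set.contains (pv_subsB adj) p)))
          (fun x => (x.length : Int)) (fun x => x)
      from rfl]
  by_cases hE : (pv_simple adj).isEmpty = true
  · rw [if_pos hE]
    have hnil : pv_simple adj = [] := List.isEmpty_iff.mp hE
    have hB : pv_pathsB adj = [] := by
      rw [List.eq_nil_iff_forall_not_mem]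
      intro x hx
      have hxs : x ∈ pv_simple adj := by
        rw [pv_simple_mem, pv_members]; exact hx
      rw [hnil] at hxs
      simp at hxs
    rw [hB]
    rfl
  · rw [if_neg hE]
    rw [pv_sorted2_eq, pv_sorted2_eq]
    refine PySem.List.sorted_eq_sorted_of_perm _ _ _ pv_key_injective ?_
    rw [List.perm_ext_iff_of_nodup (pv_primesA_nodup adj)
      (List.Nodup.filter _ (pv_pathsB_nodup adj))]
    intro a
    rw [pv_primesA_mem, pv_primesB_mem]
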